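-- pv_equiv track=rewrite | github.com/Sazkey/AOC25 | Day2/puzzle2.py | invalid_id
-- ===== SOURCE A (Python) =====
-- def invalid_id(fgroup, id):
--
--     for factor in fgroup:
--         skip = 0
--         for i in range(factor):
--             comp = id[i::factor]
--             if comp != comp[0] * len(comp):
--                 skip = 1
--                 break
--         if bool(skip):
--             continue
--         else:
--             return True
--     return False
-- ===== SOURCE B (Python) =====
-- def invalid_id(fgroup, id):
--     # f is a valid period of id iff the f-shifted overlap matches: id[f:] == id[:n-f].
--     # Nonpositive f keeps A's convention: no residue class to violate, vacuously valid.
--     n = len(id)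
--     return any(f <= 0 or id[f:] == id[:n - f] for f in fgroup)
-- ===== Notes on version B (the rewrite author's own statement) =====
-- stated objective: simpler
-- what changed: A checks, for each factor f, that every one of the f strided residue-class slices id[i::f] is a constant string, with a skip flag and break; B replaces that whole inner loop by the single shift-overlap test id[f:] == id[:n-f] (trivially satisfied for f <= 0, keeping A's vacuous-range convention).
import Mathlib
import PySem

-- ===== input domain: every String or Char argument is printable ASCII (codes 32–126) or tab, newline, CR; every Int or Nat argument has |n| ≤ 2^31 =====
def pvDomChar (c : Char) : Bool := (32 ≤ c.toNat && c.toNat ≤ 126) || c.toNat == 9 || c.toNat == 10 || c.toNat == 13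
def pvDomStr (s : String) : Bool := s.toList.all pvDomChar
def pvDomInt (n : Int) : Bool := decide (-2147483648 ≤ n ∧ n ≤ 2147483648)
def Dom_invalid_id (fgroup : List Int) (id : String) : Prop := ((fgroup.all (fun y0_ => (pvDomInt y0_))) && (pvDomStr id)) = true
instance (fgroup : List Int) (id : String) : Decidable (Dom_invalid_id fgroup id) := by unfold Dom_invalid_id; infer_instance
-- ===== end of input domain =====

-- B replaces A's per-factor loop over strided residue-class slices by a single
-- shift-overlap slice comparison id[f:] == id[:n-f]; simpler, same asymptotics.


-- ===== PORT A =====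
-- inner 'for i in range(factor): comp = id[i::factor]; if comp != comp[0]*len(comp): skip=1; break'
-- returns the final truth value of 'skip'; the 'none' branches are Python's raise points
-- (step 0 in the slice is unreachable, comp[0] on an empty comp is an IndexError, excluded by Pre_)
def pvInnerA (cs : List Char) (factor : Int) : List Int → Bool
  | [] => false
  | i :: rest =>
    match PySem.List.slice? cs (some i) none factor with
    | none => true
    | some comp =>
      match PySem.List.pyGet? comp 0 with
      | none => true
      | some c => if comp ≠ List.replicate comp.length c then true else pvInnerA cs factor rest

-- outer 'for factor in fgroup: … if bool(skip): continue else: return True' / 'return False'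
def pvOuterA (cs : List Char) : List Int → Bool
  | [] => false
  | factor :: rest =>
    if pvInnerA cs factor (PySem.List.pyRange 0 factor 1) then pvOuterA cs rest else true

def invalid_id (fgroup : List Int) (id : String) : Bool := pvOuterA id.toList fgroup

-- ===== PORT B =====
def invalid_id_alt (fgroup : List Int) (id : String) : Bool :=
  let cs := id.toList
  let n : Int := cs.length
  fgroup.any (fun f => decide (f ≤ 0)
    || (PySem.List.slice cs (some f) none == PySem.List.slice cs none (some (n - f))))

-- ===== PRECONDITION & SPEC =====
-- pvTruthy cs f: factor f makes A return True when reached (nonpositive, or a valid period)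
def pvTruthy (cs : List Char) (f : Int) : Bool :=
  decide (f ≤ 0) || (decide (f ≤ (cs.length : Int))
    && decide (cs.drop f.toNat = cs.take (cs.length - f.toNat)))

-- Pre_ excludes exactly the inputs on which A raises IndexError: those where some factor
-- greater than len(id) is reached before any factor that makes A return True.
def Pre_invalid_id (fgroup : List Int) (id : String) : Prop :=
  ∀ k, k < fgroup.length → (id.toList.length : Int) < fgroup.getD k 0 →
    ∃ j, j < k ∧ pvTruthy id.toList (fgroup.getD j 0) = true
instance (fgroup : List Int) (id : String) : Decidable (Pre_invalid_id fgroup id) := by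
  unfold Pre_invalid_id; infer_instance

def pvWitness_invalid_id : List Int × String := ([0, 2, 3], "abab")


def Spec_invalid_id (fgroup : List Int) (id : String) (out : Bool) : Prop := out = invalid_id_alt fgroup id
instance (fgroup : List Int) (id : String) (out : Bool) : Decidable (Spec_invalid_id fgroup id out) := by unfold Spec_invalid_id; infer_instance

-- ===== CLAIM (what is proved, stated in full; the proofs are below) =====
def Claim_equal_invalid_id : Prop := ∀ (fgroup : List Int) (id : String), Dom_invalid_id fgroup id → Pre_invalid_id fgroup id → Spec_invalid_id fgroup id (invalid_id fgroup id)

-- ===== LEMMAS AND PROOFS =====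

def pvCnt (n i f : Nat) : Nat := if i < n then (n - i + f - 1) / f else 0
lemma pvCnt_lt_iff (n i f k : Nat) (hf : 1 ≤ f) : k < pvCnt n i f ↔ i + f * k < n := by
  unfold pvCnt
  split_ifs with h
  · rw [Nat.lt_iff_add_one_le, Nat.le_div_iff_mul_le (by omega : 0 < f), Nat.succ_mul, Nat.mul_comm k f]
    omega
  · omega
lemma filterMap_eq_map_of_mem {α β : Type} (l : List α) (f : α → Option β) (g : α → β)
    (h : ∀ a ∈ l, f a = some (g a)) : l.filterMap f = l.map g := by
  induction l with
  | nil => rfl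
  | cons a t ih =>
    simp [h a (by simp), ih (fun x hx => h x (by simp [hx]))]
lemma slice?_from_pos (cs : List Char) (i f : Nat) (hf : 1 ≤ f) (hi : i ≤ cs.length) :
    PySem.List.slice? cs (some (i : Int)) none (f : Int)
      = some ((List.range (pvCnt cs.length i f)).map (fun k => cs.getD (i + f * k) default)) := by
  have hf0 : ¬((f:Int) = 0) := by exact_mod_cast Nat.one_le_iff_ne_zero.mp hf
  have hfneg : ¬((f:Int) < 0) := by omega
  have hineg : ¬((i:Int) < 0) := by omega
  have hile : min (i:Int) (cs.length:Int) = (i:Int) := by omega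
  unfold PySem.List.slice? PySem.List.sliceIndices
  simp only [hf0, hfneg, hineg, if_false, hile]
  have hcount : (if 0 < (f:Int) then if (i:Int) < (cs.length:Int) then (((cs.length:Int) - ↑i + ↑f - 1) / ↑f).toNat else 0
          else if (cs.length:Int) < ↑i then ((↑i - (cs.length:Int) + -↑f - 1) / -↑f).toNat else 0) = pvCnt cs.length i f := by
    rw [if_pos (by omega)]
    unfold pvCnt
    by_cases h : i < cs.length
    · rw [if_pos (by exact_mod_cast h), if_pos h]
      have h1 : ((cs.length:Int) - ↑i + ↑f - 1) = ((cs.length - i + f - 1 : Nat) : Int) := by omega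
      rw [h1]
      rfl
    · rw [if_neg (by exact_mod_cast h), if_neg h]
  rw [hcount]
  congr 1
  apply filterMap_eq_map_of_mem
  intro k hk
  rw [List.mem_range] at hk
  have hlt : i + f * k < cs.length := (pvCnt_lt_iff _ _ _ _ hf).mp hk
  have hidx : ((i:Int) + ↑f * ↑k).toNat = i + f * k := by omega
  rw [hidx, List.getElem?_eq_getElem hlt, List.getD_eq_getElem cs default hlt]

lemma const_iff (cs : List Char) (i f : Nat) :
    ((List.range (pvCnt cs.length i f)).map (fun k => cs.getD (i + f * k) default)
        = List.replicate ((List.range (pvCnt cs.length i f)).map (fun k => cs.getD (i + f * k) default)).length (cs.getD i default))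
      ↔ ∀ k < pvCnt cs.length i f, cs.getD (i + f * k) default = cs.getD i default := by
  rw [List.eq_replicate_iff]
  simp only [List.length_map, List.mem_map, List.mem_range, true_and]
  constructor
  · intro h k hk; exact h _ ⟨k, hk, rfl⟩
  · rintro h b ⟨k, hk, rfl⟩; exact h k hk

lemma innerA_false_iff (cs : List Char) (f : Int) (rs : List Int)
    (hf : 1 ≤ f) (hfn : f ≤ (cs.length : Int))
    (hrs : ∀ i ∈ rs, 0 ≤ i ∧ i < f) :
    pvInnerA cs f rs = false
      ↔ ∀ i ∈ rs, ∀ k < pvCnt cs.length i.toNat f.toNat,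
          cs.getD (i.toNat + f.toNat * k) default = cs.getD i.toNat default := by
  induction rs with
  | nil => simp [pvInnerA]
  | cons i rest ih =>
    obtain ⟨hi0, hif⟩ := hrs i (by simp)
    have hfN : 1 ≤ f.toNat := by omega
    have hiN : i.toNat < cs.length := by omega
    have hcast : (i : Int) = ((i.toNat : Nat) : Int) := by omega
    have hfcast : (f : Int) = ((f.toNat : Nat) : Int) := by omega
    have hcnt : 0 < pvCnt cs.length i.toNat f.toNat := by
      rw [pvCnt_lt_iff _ _ _ _ hfN]; omega
    have hs : PySem.List.slice? cs (some i) none f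
        = some ((List.range (pvCnt cs.length i.toNat f.toNat)).map
            (fun k => cs.getD (i.toNat + f.toNat * k) default)) := by
      rw [hcast, hfcast]; exact slice?_from_pos cs i.toNat f.toNat hfN (by omega)
    have hget : PySem.List.pyGet? ((List.range (pvCnt cs.length i.toNat f.toNat)).map
        (fun k => cs.getD (i.toNat + f.toNat * k) default)) 0
        = some (cs.getD i.toNat default) := by
      have h0 : ((List.range (pvCnt cs.length i.toNat f.toNat)).map
          (fun k => cs.getD (i.toNat + f.toNat * k) default))[0]? = some (cs.getD i.toNat default) := by
        simp [List.getElem?_map, List.getElem?_range hcnt]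
      simp [PySem.List.pyGet?, PySem.List.pyIdx?, hcnt]
    rw [pvInnerA]
    simp only [hs, hget]
    simp only [ne_eq, ite_not]
    split_ifs with hc
    · rw [ih (fun x hx => hrs x (by simp [hx]))]
      constructor
      · intro h x hx
        rcases List.mem_cons.mp hx with rfl | hx'
        · exact (const_iff cs x.toNat f.toNat).mp hc
        · exact h x hx'
      · intro h x hx
        exact h x (by simp [hx])
    · simp only [false_iff]
      intro h
      exact hc ((const_iff cs i.toNat f.toNat).mpr (h i (by simp)))

lemma period_iff (cs : List Char) (f : Nat) (hf : 1 ≤ f) (hfn : f ≤ cs.length) :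
    (∀ i < f, ∀ k < pvCnt cs.length i f, cs.getD (i + f * k) default = cs.getD i default)
      ↔ ∀ j, j + f < cs.length → cs.getD j default = cs.getD (j + f) default := by
  constructor
  · intro H j hj
    have hi : j % f < f := Nat.mod_lt _ (by omega)
    have hdecomp : j % f + f * (j / f) = j := Nat.mod_add_div j f
    have h1 := H (j % f) hi (j / f) (by rw [pvCnt_lt_iff _ _ _ _ hf, hdecomp]; omega)
    have h2 := H (j % f) hi (j / f + 1)
      (by rw [pvCnt_lt_iff _ _ _ _ hf]; rw [Nat.mul_add, ← Nat.add_assoc, hdecomp]; omega)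
    rw [hdecomp] at h1
    rw [Nat.mul_add, ← Nat.add_assoc, hdecomp] at h2
    simp only [Nat.mul_one] at h2
    rw [h1, h2]
  · intro H i _ k hk
    induction k with
    | zero => simp
    | succ m ihm =>
      have hm : i + f * m + f < cs.length := by
        have := (pvCnt_lt_iff cs.length i f (m+1) hf).mp hk
        rw [Nat.mul_add, Nat.mul_one] at this; omega
      have step := H (i + f * m) hm
      have ihm' := ihm (by rw [pvCnt_lt_iff _ _ _ _ hf]; omega)
      calc cs.getD (i + f * (m + 1)) default
          = cs.getD (i + f * m + f) default := by rw [show i + f * (m + 1) = i + f * m + f by ring]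
        _ = cs.getD (i + f * m) default := step.symm
        _ = cs.getD i default := ihm'

lemma overlap_iff (cs : List Char) (f : Nat) (hfn : f ≤ cs.length) :
    (cs.drop f = cs.take (cs.length - f))
      ↔ ∀ j, j + f < cs.length → cs.getD j default = cs.getD (j + f) default := by
  constructor
  · intro h j hj
    have := congrArg (fun l => l.getD j default) h
    simp only [List.getD_eq_getElem?_getD, List.getElem?_drop, List.getElem?_take] at this
    rw [if_pos (by omega)] at this
    rw [List.getD_eq_getElem?_getD, List.getD_eq_getElem?_getD, Nat.add_comm j f]
    exact this.symm
  · intro H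
    apply List.ext_getElem
    · simp
    · intro j h1 h2
      have hj : j + f < cs.length := by simp at h1; omega
      have hthis := H j hj
      simp only [List.getElem_drop, List.getElem_take]
      rw [List.getD_eq_getElem cs default (by omega), List.getD_eq_getElem cs default hj] at hthis
      have e : cs[f + j]'(by omega) = cs[j + f]'hj := by congr 1; omega
      rw [e]
      exact hthis.symm

lemma factor_agree_pos (cs : List Char) (f : Int) (hf : 1 ≤ f) (hfn : f ≤ (cs.length : Int)) :
    (!pvInnerA cs f (PySem.List.pyRange 0 f 1))
      = (PySem.List.slice cs (some f) none == PySem.List.slice cs none (some ((cs.length : Int) - f))) := by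
  have hfN : 1 ≤ f.toNat := by omega
  have hfnN : f.toNat ≤ cs.length := by omega
  rw [Bool.eq_iff_iff]
  simp only [Bool.not_eq_eq_eq_not, Bool.not_true, beq_iff_eq]
  rw [innerA_false_iff cs f _ hf hfn (fun i hi => by
        rw [PySem.List.mem_pyRange_one] at hi; exact hi)]
  have hfrom : PySem.List.slice cs (some f) none = cs.drop f.toNat :=
    PySem.List.slice_from cs (by omega)
  have hto : PySem.List.slice cs none (some ((cs.length : Int) - f)) = cs.take (cs.length - f.toNat) := by
    rw [PySem.List.slice_to cs (by omega)]
    congr 1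
    omega
  rw [hfrom, hto, overlap_iff cs f.toNat hfnN, ← period_iff cs f.toNat hfN hfnN]
  constructor
  · intro h i hi
    have := h (i : Int) (by rw [PySem.List.mem_pyRange_one]; omega)
    simpa using this
  · intro h i hi
    rw [PySem.List.mem_pyRange_one] at hi
    have hiN : i.toNat < f.toNat := by omega
    exact h i.toNat hiN


lemma slice_pair_eq (cs : List Char) (f : Int) (hf : 0 ≤ f) (hfn : f ≤ (cs.length : Int)) :
    (PySem.List.slice cs (some f) none == PySem.List.slice cs none (some ((cs.length : Int) - f)))
      = decide (cs.drop f.toNat = cs.take (cs.length - f.toNat)) := by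
  rw [PySem.List.slice_from cs hf, PySem.List.slice_to cs (by omega)]
  have h : ((cs.length : Int) - f).toNat = cs.length - f.toNat := by omega
  rw [h, Bool.eq_iff_iff]
  simp

lemma outer_eq (cs : List Char) (l : List Int)
    (hpre : ∀ k, k < l.length → (cs.length : Int) < l.getD k 0 →
      ∃ j, j < k ∧ pvTruthy cs (l.getD j 0) = true) :
    pvOuterA cs l = l.any (fun f => decide (f ≤ 0)
      || (PySem.List.slice cs (some f) none == PySem.List.slice cs none (some ((cs.length : Int) - f)))) := by
  induction l with
  | nil => rfl
  | cons f rest ih =>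
    rw [pvOuterA, List.any_cons]
    by_cases hf0 : f ≤ 0
    · rw [PySem.List.pyRange_one_eq_nil (by omega)]
      simp [pvInnerA, hf0]
    · have hf1 : 1 ≤ f := by omega
      have hfn : f ≤ (cs.length : Int) := by
        by_contra hbig
        obtain ⟨j, hj, _⟩ := hpre 0 (by simp) (by simpa using by omega)
        omega
      have hfa := factor_agree_pos cs f hf1 hfn
      cases hb : pvInnerA cs f (PySem.List.pyRange 0 f 1) with
      | false =>
        rw [hb] at hfa
        simp [← hfa]
      | true =>
        rw [hb] at hfa
        have hne : decide (cs.drop f.toNat = cs.take (cs.length - f.toNat)) = false := by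
          rw [← slice_pair_eq cs f (by omega) hfn, ← hfa]
          rfl
        have hnt : pvTruthy cs f = false := by
          unfold pvTruthy
          simp only [hne, Bool.and_false, Bool.or_false, decide_eq_false_iff_not]
          omega
        rw [if_pos rfl]
        have hpre' : ∀ k, k < rest.length → (cs.length : Int) < rest.getD k 0 →
            ∃ j, j < k ∧ pvTruthy cs (rest.getD j 0) = true := by
          intro k hk hkbig
          obtain ⟨j, hj, htr⟩ := hpre (k + 1) (by simpa using hk) (by simpa using hkbig)
          cases j with
          | zero => simp only [List.getD_cons_zero] at htr; rw [hnt] at htr; cases htr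
          | succ j' => exact ⟨j', by omega, by simpa using htr⟩
        rw [ih hpre']
        have hguard : decide (f ≤ 0) = false := by simp [hf0]
        rw [← hfa] at *
        simp [hguard, ← hfa]

-- ===== VERDICT (by name: the statement is the Claim_ definition above) =====
theorem invalid_id_spec : Claim_equal_invalid_id := by
  intro fgroup id _ hpre
  unfold Spec_invalid_id invalid_id invalid_id_alt
  exact outer_eq id.toList fgroup hpre
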